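-- pv_equiv track=rewrite | github.com/zhao56164394/qiankun-three-lines-v8 | bagua_engine.py | get_transition_type
-- ===== SOURCE A (Python) =====
-- def get_transition_type(from_bin, to_bin):
--     """判断卦变类型: 变了几个爻"""
--     if from_bin is None or to_bin is None:
--         return None
--     diff = sum(1 for a, b in zip(from_bin, to_bin) if a != b)
--     if diff == 0: return '不变'
--     if diff == 1:
--         # 找到变的是哪个爻
--         for i, (a, b) in enumerate(zip(from_bin, to_bin)):
--             if a != b:
--                 yao_names = ['初爻(位置)', '二爻(速度)', '三爻(主力动向)']
--                 direction = '阴→阳' if b == '1' else '阳→阴'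
--                 return f'单变_{yao_names[i]}_{direction}'
--     if diff == 2: return '双变'
--     return '三变(剧变)'
-- ===== SOURCE B (Python) =====
-- def get_transition_type(from_bin, to_bin):
--     """判断卦变类型: 变了几个爻"""
--     if from_bin is None or to_bin is None:
--         return None
--     # one-pass finite-state machine over the zipped lines; breaks out at the
--     # third change since every further change is irrelevant to the answer
--     state = ('zero',)
--     for i, (a, b) in enumerate(zip(from_bin, to_bin)):
--         if a != b:
--             if state[0] == 'zero':
--                 state = ('one', i, b)
--             elif state[0] == 'one':
--                 state = ('two',)
--             else:
--                 state = ('many',)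
--                 break
--     if state[0] == 'zero':
--         return '不变'
--     if state[0] == 'one':
--         _, i, b = state
--         yao = ['初爻(位置)', '二爻(速度)', '三爻(主力动向)'][i]
--         return f"单变_{yao}_{'阴→阳' if b == '1' else '阳→阴'}"
--     if state[0] == 'two':
--         return '双变'
--     return '三变(剧变)'
-- ===== Notes on version B (the rewrite author's own statement) =====
-- stated objective: alternative
-- what changed: B replaces A's count-then-rescan (sum over the zip, then a second enumerate loop to locate the single change) with a single-pass finite-state machine (zero/one(i,b)/two/many) over the zipped lines that short-circuits at the third change and dispatches on the final state.
import Mathlib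
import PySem

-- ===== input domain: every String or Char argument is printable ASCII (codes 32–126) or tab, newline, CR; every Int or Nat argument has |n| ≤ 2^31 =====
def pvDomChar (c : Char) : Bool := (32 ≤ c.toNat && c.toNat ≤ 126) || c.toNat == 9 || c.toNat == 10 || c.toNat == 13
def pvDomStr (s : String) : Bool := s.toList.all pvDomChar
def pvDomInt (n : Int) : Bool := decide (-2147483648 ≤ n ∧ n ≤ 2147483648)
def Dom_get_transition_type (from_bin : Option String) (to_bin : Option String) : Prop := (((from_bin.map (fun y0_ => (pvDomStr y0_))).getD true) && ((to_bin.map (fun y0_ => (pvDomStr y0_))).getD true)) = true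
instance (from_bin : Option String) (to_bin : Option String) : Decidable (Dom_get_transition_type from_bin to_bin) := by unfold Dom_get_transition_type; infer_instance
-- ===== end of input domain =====

-- B runs a one-pass finite-state machine (zero/one/two/many, breaking at the third change)
-- over the zipped lines instead of A's count pass plus a second locating scan.

-- ===== PORT A =====
def yaoNamesA : List String := ["初爻(位置)", "二爻(速度)", "三爻(主力动向)"]

-- A's 'for i, (a, b) in enumerate(zip(...))' locating loop; 'some r' = the loop returned r
-- (r = none models the IndexError from yao_names[i], outside Pre_); 'none' = loop fell through.
def loopA : Nat → List (Char × Char) → Option (Option String)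
  | _, [] => none
  | i, (a, b) :: rest =>
    if a != b then
      some ((PySem.List.pyGet? yaoNamesA (i : Int)).map (fun nm =>
        "单变_" ++ nm ++ "_" ++ (if b == '1' then "阴→阳" else "阳→阴")))
    else loopA (i + 1) rest

def get_transition_type (from_bin : Option String) (to_bin : Option String) : Option String :=
  match from_bin, to_bin with
  | none, _ => none
  | _, none => none
  | some f, some t =>
    let pairs := f.toList.zip t.toList
    let diff := (pairs.filter (fun p => p.1 != p.2)).length
    if diff = 0 then some "不变"
    else if diff = 1 then
      match loopA 0 pairs with
      | some r => r
      | none => if diff = 2 then some "双变" else some "三变(剧变)"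
    else if diff = 2 then some "双变"
    else some "三变(剧变)"

-- ===== PORT B =====
def yaoNamesB : List String := ["初爻(位置)", "二爻(速度)", "三爻(主力动向)"]

-- the state of B's machine: no change seen / one change (index, new char) / two / three or more
inductive StB : Type
  | zero : StB
  | one : Nat → Char → StB
  | two : StB
  | many : StB
deriving DecidableEq, Repr

-- B's single loop: advance the state on each differing pair, break at 'many'
def runB : StB → Nat → List (Char × Char) → StB
  | s, _, [] => s
  | s, i, (a, b) :: rest =>
    if a != b then
      match s with
      | .zero => runB (.one i b) (i + 1) rest
      | .one _ _ => runB .two (i + 1) rest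
      | _ => .many   -- break
    else runB s (i + 1) rest

def get_transition_type_alt (from_bin : Option String) (to_bin : Option String) : Option String :=
  match from_bin, to_bin with
  | none, _ => none
  | _, none => none
  | some f, some t =>
    match runB .zero 0 (f.toList.zip t.toList) with
    | .zero => some "不变"
    | .one i b =>
      match PySem.List.pyGet? yaoNamesB (i : Int) with
      | none => none   -- IndexError, outside Pre_
      | some nm => some ("单变_" ++ nm ++ "_" ++ (if b == '1' then "阴→阳" else "阳→阴"))
    | .two => some "双变"
    | .many => some "三变(剧变)"

-- ===== PRECONDITION & SPEC =====
-- Pre_ excludes the inputs on which the Python raises IndexError (both A and B do):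
-- exactly one differing position among the zipped characters and that position is at index ≥ 3.
def Pre_get_transition_type (from_bin : Option String) (to_bin : Option String) : Prop :=
  from_bin.isSome = true → to_bin.isSome = true →
    (let pairs := (from_bin.getD "").toList.zip ((to_bin.getD "").toList)
     (pairs.filter (fun p => p.1 != p.2)).length = 1 →
       ((pairs.drop 3).filter (fun p => p.1 != p.2)).length = 0)
instance (from_bin : Option String) (to_bin : Option String) : Decidable (Pre_get_transition_type from_bin to_bin) := by unfold Pre_get_transition_type; infer_instance

def pvWitness_get_transition_type : Option String × Option String := (some "101", some "111")

def Spec_get_transition_type (from_bin : Option String) (to_bin : Option String) (out : Option String) : Prop := out = get_transition_type_alt from_bin to_bin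
instance (from_bin : Option String) (to_bin : Option String) (out : Option String) : Decidable (Spec_get_transition_type from_bin to_bin out) := by unfold Spec_get_transition_type; infer_instance

-- ===== CLAIM (what is proved, stated in full; the proofs are below) =====
def Claim_equal_get_transition_type : Prop := ∀ (from_bin : Option String) (to_bin : Option String), Dom_get_transition_type from_bin to_bin → Pre_get_transition_type from_bin to_bin → Spec_get_transition_type from_bin to_bin (get_transition_type from_bin to_bin)

-- ===== LEMMAS AND PROOFS =====

-- proof-only helper: the list of changes B's machine abstracts
def chgs : Nat → List (Char × Char) → List (Nat × Char)
  | _, [] => []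
  | i, (a, b) :: rest =>
    if a != b then (i, b) :: chgs (i + 1) rest else chgs (i + 1) rest

theorem chgs_length (l : List (Char × Char)) : ∀ i, (chgs i l).length = (l.filter (fun p => p.1 != p.2)).length := by
  induction l with
  | nil => intro i; simp [chgs]
  | cons hd tl ih =>
    intro i
    obtain ⟨a, b⟩ := hd
    by_cases h : (a != b) = true <;> simp [chgs, h, List.filter, ih]

theorem loopA_eq_chgs (l : List (Char × Char)) : ∀ i,
    loopA i l = (chgs i l).head?.map (fun p =>
      (PySem.List.pyGet? yaoNamesA (p.1 : Int)).map (fun nm =>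
        "单变_" ++ nm ++ "_" ++ (if p.2 == '1' then "阴→阳" else "阳→阴"))) := by
  induction l with
  | nil => intro i; simp [chgs, loopA]
  | cons hd tl ih =>
    intro i
    obtain ⟨a, b⟩ := hd
    by_cases h : (a != b) = true <;> simp [chgs, loopA, h, ih]

-- classify the change list into the machine's final state
def classify : List (Nat × Char) → StB
  | [] => .zero
  | [(i, b)] => .one i b
  | [_, _] => .two
  | _ => .many

theorem runB_two (l : List (Char × Char)) : ∀ i,
    runB .two i l = (if (l.filter (fun p => p.1 != p.2)).length = 0 then .two else .many) := by
  induction l with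
  | nil => intro i; simp [runB]
  | cons hd tl ih =>
    intro i
    obtain ⟨a, b⟩ := hd
    by_cases h : (a != b) = true <;> simp [runB, h, List.filter, ih]

theorem runB_one (l : List (Char × Char)) : ∀ j c i,
    runB (.one j c) i l = classify ((j, c) :: chgs i l) := by
  induction l with
  | nil => intro j c i; simp [runB, chgs, classify]
  | cons hd tl ih =>
    intro j c i
    obtain ⟨a, b⟩ := hd
    by_cases h : (a != b) = true
    · simp only [runB, h, if_pos, chgs]
      rw [runB_two]
      rw [← chgs_length tl (i+1)]
      match hc : chgs (i + 1) tl with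
      | [] => simp [classify]
      | x :: rest => simp [classify]
    · simp [runB, chgs, h, ih]

theorem runB_zero (l : List (Char × Char)) : ∀ i,
    runB .zero i l = classify (chgs i l) := by
  induction l with
  | nil => intro i; simp [runB, chgs, classify]
  | cons hd tl ih =>
    intro i
    obtain ⟨a, b⟩ := hd
    by_cases h : (a != b) = true
    · simp only [runB, h, if_pos, chgs]
      exact runB_one tl i b (i + 1)
    · simp [runB, chgs, h, ih]

theorem get_transition_type_eq (from_bin : Option String) (to_bin : Option String) :
    get_transition_type from_bin to_bin = get_transition_type_alt from_bin to_bin := by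
  match from_bin, to_bin with
  | none, _ => rfl
  | some _, none => rfl
  | some f, some t =>
    show get_transition_type (some f) (some t) = get_transition_type_alt (some f) (some t)
    unfold get_transition_type get_transition_type_alt
    simp only
    set pairs := f.toList.zip t.toList with hp
    have hlen := chgs_length pairs 0
    have hloop := loopA_eq_chgs pairs 0
    rw [runB_zero pairs 0]
    match hc : chgs 0 pairs with
    | [] =>
      rw [hc] at hlen
      simp [← hlen, classify]
    | [(i, b)] =>
      rw [hc] at hlen hloop
      simp only [List.head?] at hloop
      rw [← hlen, hloop]
      simp only [List.length_cons, List.length_nil, classify]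
      norm_num
      simp only [yaoNamesA, yaoNamesB]
      cases hg : (["初爻(位置)", "二爻(速度)", "三爻(主力动向)"] : List String)[i]? with
      | none => simp
      | some nm => simp
    | (x :: y :: []) =>
      rw [hc] at hlen
      simp only [List.length_cons, List.length_nil] at hlen
      rw [← hlen]
      obtain ⟨xi, xb⟩ := x; obtain ⟨yi, yb⟩ := y
      norm_num [classify]
    | (x :: y :: z :: rest) =>
      rw [hc] at hlen
      simp only [List.length_cons] at hlen
      rw [← hlen]
      have h2 : ¬ (rest.length + 1 + 1 + 1 = 2) := by omega
      obtain ⟨xi, xb⟩ := x; obtain ⟨yi, yb⟩ := y; obtain ⟨zi, zb⟩ := z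
      simp [h2, classify]

-- ===== VERDICT (by name: the statement is the Claim_ definition above) =====
theorem get_transition_type_spec : Claim_equal_get_transition_type := by
  intro from_bin to_bin _ _
  unfold Spec_get_transition_type
  exact get_transition_type_eq from_bin to_bin
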